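-- pv_equiv track=rewrite | github.com/saikumaradapa/GeeksForGeeks-Solutions | Number of BST From Array.py | countBSTs
-- ===== SOURCE A (Python) =====
-- def countBSTs(arr):
--     n = len(arr)
--     ans = [0] * n
--
--     index_map = {v: i for i, v in enumerate(arr)}
--     arr.sort()
--
--     # Precompute Catalan numbers
--     catalan = [0] * (n + 1)
--     catalan[0] = 1
--     catalan[1] = 1
--
--     for i in range(2, n + 1):
--         for j in range(i):
--             catalan[i] += catalan[j] * catalan[i - j - 1]
--
--     for i in range(n):
--         left = i
--         right = n - i - 1
--         root_value = arr[i]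
--         original_index = index_map[root_value]
--
--         ans[original_index] = catalan[left] * catalan[right]
--
--     return ans
-- ===== SOURCE B (Python) =====
-- # Catalan numbers via the O(1) multiplicative recurrence (instead of A's O(n^2)
-- # convolution); answer scattered by rank over enumerate(sorted(arr)) with the same
-- # {value: index} dict rule as A (last occurrence wins); arr is not mutated.
-- def countBSTs(arr):
--     n = len(arr)
--     cats = [1]
--     c = 1
--     for k in range(1, n):
--         c = c * (4 * k - 2) // (k + 1)
--         cats.append(c)
--     last = {v: j for j, v in enumerate(arr)}
--     res = [0] * n
--     for r, v in enumerate(sorted(arr)):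
--         res[last[v]] = cats[r] * cats[n - 1 - r]
--     return res
-- ===== Notes on version B (the rewrite author's own statement) =====
-- stated objective: faster
-- what changed: B computes the Catalan numbers with the O(1)-per-step multiplicative recurrence c_k = c_{k-1}*(4k-2)//(k+1) instead of A's O(n^2) convolution loop, and scatters rank-indexed products while iterating enumerate(sorted(arr)) with the same {value: index} dict rule as A, without sorting arr in place.
import Mathlib
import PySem

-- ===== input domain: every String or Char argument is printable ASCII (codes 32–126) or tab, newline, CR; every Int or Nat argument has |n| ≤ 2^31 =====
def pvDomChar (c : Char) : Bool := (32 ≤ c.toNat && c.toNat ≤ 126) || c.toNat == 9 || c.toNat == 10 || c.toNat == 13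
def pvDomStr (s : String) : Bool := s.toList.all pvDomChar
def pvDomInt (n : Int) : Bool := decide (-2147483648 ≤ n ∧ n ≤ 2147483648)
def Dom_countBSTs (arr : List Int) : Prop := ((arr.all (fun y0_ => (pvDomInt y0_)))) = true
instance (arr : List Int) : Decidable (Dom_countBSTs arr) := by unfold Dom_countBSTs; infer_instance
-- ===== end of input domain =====

-- B replaces A's O(n^2) Catalan convolution by the O(1)-per-step multiplicative recurrence,
-- scattering the rank-indexed products while iterating enumerate(sorted(arr)) (objective: faster).
-- NOTE: A sorts its argument in place (arr.sort()); the equivalence proved is about the RETURN value only (B does not mutate arr).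

-- ===== PORT A =====
-- {v: i for i, v in enumerate(arr)}  (A's index_map and B's last: the same dict comprehension)
def idxDict (xs : List Int) : PySem.Dict Int Int :=
  (PySem.List.enumerate xs).foldl (fun d p => d.insert p.2 p.1) PySem.Dict.empty

-- inner loop 'for j in range(i): catalan[i] += catalan[j] * catalan[i - j - 1]'
def aCatInner (i : Nat) (c : List Int) : List Int :=
  (List.range i).foldl (fun c j => c.set i (c.getD i 0 + c.getD j 0 * c.getD (i - j - 1) 0)) c

-- catalan = [0]*(n+1); catalan[0] = 1; catalan[1] = 1; for i in range(2, n+1): inner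
def aCatalan (n : Nat) : List Int :=
  (List.range' 2 (n - 1)).foldl (fun c i => aCatInner i c)
    (((List.replicate (n + 1) (0 : Int)).set 0 1).set 1 1)

def countBSTs (arr : List Int) : List Int :=
  (List.range arr.length).foldl
    (fun a i =>
      a.set ((idxDict arr).getD ((PySem.List.sorted arr (fun x => x) false).getD i 0) 0).toNat
        ((aCatalan arr.length).getD i 0 * (aCatalan arr.length).getD (arr.length - i - 1) 0))
    (List.replicate arr.length 0)

-- ===== PORT B =====
-- cats = [1]; c = 1; for k in range(1, n): c = c*(4*k-2)//(k+1); cats.append(c)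
def bCats (n : Nat) : List Int :=
  ((List.range' 1 (n - 1)).foldl
    (fun (st : List Int × Int) (k : Nat) =>
      (st.1 ++ [PySem.Int.floordiv (st.2 * (4 * (k : Int) - 2)) ((k : Int) + 1)],
       PySem.Int.floordiv (st.2 * (4 * (k : Int) - 2)) ((k : Int) + 1)))
    ([1], 1)).1

def countBSTs_alt (arr : List Int) : List Int :=
  (PySem.List.enumerate (PySem.List.sorted arr (fun x => x) false)).foldl
    (fun res p =>
      res.set (((idxDict arr).getD p.2 0).toNat)
        ((bCats arr.length).getD p.1.toNat 0 *
         (bCats arr.length).getD (arr.length - 1 - p.1.toNat) 0))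
    (List.replicate arr.length 0)

-- ===== PRECONDITION & SPEC =====
-- Pre_ excludes only the empty list, on which A raises IndexError (it writes catalan[1] into a list of length 1).
def Pre_countBSTs (arr : List Int) : Prop := arr ≠ []
instance (arr : List Int) : Decidable (Pre_countBSTs arr) := by unfold Pre_countBSTs; infer_instance

def pvWitness_countBSTs : List Int := [3, 1, 2]

def Spec_countBSTs (arr : List Int) (out : List Int) : Prop := out = countBSTs_alt arr
instance (arr : List Int) (out : List Int) : Decidable (Spec_countBSTs arr out) := by unfold Spec_countBSTs; infer_instance

-- ===== CLAIM (what is proved, stated in full; the proofs are below) =====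
def Claim_equal_countBSTs : Prop := ∀ (arr : List Int), Dom_countBSTs arr → Pre_countBSTs arr → Spec_countBSTs arr (countBSTs arr)

-- ===== LEMMAS AND PROOFS =====

-- abbreviation used only by the proofs: the k-th Catalan number as an Int
def catI (k : Nat) : Int := (catalan k : Int)

-- getD-of-set facts specialised to default 0
lemma getD_set_ne' (l : List Int) (i j : Nat) (v : Int) (h : i ≠ j) :
    (l.set i v).getD j 0 = l.getD j 0 := by
  simp [List.getD_eq_getElem?_getD, List.getElem?_set_ne h]

lemma getD_set_self' (l : List Int) (i : Nat) (v : Int) (h : i < l.length) :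
    (l.set i v).getD i 0 = v := by
  simp [List.getD_eq_getElem?_getD, List.getElem?_set_self h]

lemma getD_eq_getElem' (l : List Int) (j : Nat) (h : j < l.length) : l.getD j 0 = l[j] := by
  simp [List.getD_eq_getElem?_getD, List.getElem?_eq_getElem h]

-- the multiplicative recurrence, from Mathlib's centralBinom facts
lemma cat_rec (m : Nat) : (m + 2) * catalan (m + 1) = (4 * m + 2) * catalan m := by
  have h2 := Nat.succ_mul_centralBinom_succ m
  have h3 := succ_mul_catalan_eq_centralBinom m
  have h1 := succ_mul_catalan_eq_centralBinom (m + 1)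
  have key : (m + 1) * ((m + 2) * catalan (m + 1)) = (m + 1) * ((4 * m + 2) * catalan m) := by
    calc (m + 1) * ((m + 2) * catalan (m + 1))
        = (m + 1) * ((m + 1 + 1) * catalan (m + 1)) := by ring_nf
      _ = (m + 1) * (m + 1).centralBinom := by rw [h1]
      _ = 2 * (2 * m + 1) * m.centralBinom := h2
      _ = 2 * (2 * m + 1) * ((m + 1) * catalan m) := by rw [h3]
      _ = (m + 1) * ((4 * m + 2) * catalan m) := by ring
  exact Nat.eq_of_mul_eq_mul_left (by omega) key

lemma sum_map_range (n : Nat) (f : Nat → Nat) :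
    ((List.range n).map f).sum = ∑ i ∈ Finset.range n, f i := by
  induction n with
  | zero => simp
  | succ n ih => rw [List.range_succ, List.map_append, List.sum_append, Finset.sum_range_succ, ih]; simp

lemma cat_conv (m : Nat) :
    ((List.range (m + 1)).map (fun j => catalan j * catalan (m - j))).sum = catalan (m + 1) := by
  rw [sum_map_range, catalan_succ m, ← Fin.sum_univ_eq_sum_range (fun i => catalan i * catalan (m - i)) (m + 1)]

lemma catI_conv (a : Nat) (ha : 1 ≤ a) :
    ((List.range a).map (fun j => catI j * catI (a - 1 - j))).sum = catI a := by
  have h := cat_conv (a - 1)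
  rw [show a - 1 + 1 = a by omega] at h
  unfold catI
  rw [← h, Nat.cast_list_sum, List.map_map]
  rfl

-- A's inner convolution loop, as a single set
lemma aCatInner_aux (i : Nat) (hi : 1 ≤ i) (js : List Nat) (hjs : ∀ j ∈ js, j < i) :
    ∀ l : List Int, i < l.length →
      js.foldl (fun c j => c.set i (c.getD i 0 + c.getD j 0 * c.getD (i - j - 1) 0)) l
        = l.set i (l.getD i 0 + (js.map (fun j => l.getD j 0 * l.getD (i - j - 1) 0)).sum) := by
  induction js with
  | nil =>
    intro l hl
    simp only [List.foldl_nil, List.map_nil, List.sum_nil, add_zero,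
      List.getD_eq_getElem?_getD, List.getElem?_eq_getElem hl, Option.getD_some]
    exact (List.set_getElem_self hl).symm
  | cons j js ih =>
    intro l hl
    simp only [List.foldl_cons, List.map_cons, List.sum_cons]
    have hj : j < i := hjs j (by simp)
    have hlen' : i < (l.set i (l.getD i 0 + l.getD j 0 * l.getD (i - j - 1) 0)).length := by
      simpa using hl
    rw [ih (fun j hj' => hjs j (by simp [hj'])) _ hlen']
    rw [List.set_set]
    rw [getD_set_self' l i _ hl]
    have hmapeq : ∀ j' ∈ js,
        (l.set i (l.getD i 0 + l.getD j 0 * l.getD (i - j - 1) 0)).getD j' 0 *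
        (l.set i (l.getD i 0 + l.getD j 0 * l.getD (i - j - 1) 0)).getD (i - j' - 1) 0
          = l.getD j' 0 * l.getD (i - j' - 1) 0 := by
      intro j' hj'
      have h1 : j' < i := hjs j' (by simp [hj'])
      rw [getD_set_ne' l i j' _ (by omega), getD_set_ne' l i (i - j' - 1) _ (by omega)]
    rw [List.map_congr_left hmapeq, add_assoc]

lemma aCatInner_spec (i : Nat) (hi : 1 ≤ i) (l : List Int) (hlen : i < l.length) :
    aCatInner i l
      = l.set i (l.getD i 0 + ((List.range i).map (fun j => l.getD j 0 * l.getD (i - j - 1) 0)).sum) := by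
  exact aCatInner_aux i hi (List.range i) (fun j hj => List.mem_range.mp hj) l hlen

-- A's catalan table invariant
lemma aCatalan_aux (n : Nat) :
    ∀ (cnt a : Nat) (l : List Int), 2 ≤ a → a - 1 + cnt ≤ n →
      l.length = n + 1 → (∀ k, l.getD k 0 = if k ≤ a - 1 then catI k else 0) →
      ((List.range' a cnt).foldl (fun c i => aCatInner i c) l).length = n + 1 ∧
      (∀ k, ((List.range' a cnt).foldl (fun c i => aCatInner i c) l).getD k 0
          = if k ≤ a - 1 + cnt then catI k else 0) := by
  intro cnt
  induction cnt with
  | zero => intro a l _ _ h1 h2; exact ⟨h1, by simpa using h2⟩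
  | succ cnt ih =>
    intro a l ha hbound hlen hinv
    rw [List.range'_succ]
    simp only [List.foldl_cons]
    have ha1 : 1 ≤ a := by omega
    have haln : a < l.length := by omega
    have hstep : aCatInner a l = l.set a (catI a) := by
      rw [aCatInner_spec a ha1 l haln]
      have h0 : l.getD a 0 = 0 := by rw [hinv a]; simp; omega
      have hmapeq : ∀ j ∈ List.range a,
          l.getD j 0 * l.getD (a - j - 1) 0 = catI j * catI (a - 1 - j) := by
        intro j hj
        have hj' : j < a := List.mem_range.mp hj
        rw [hinv j, hinv (a - j - 1), if_pos (by omega : j ≤ a - 1),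
            if_pos (by omega : a - j - 1 ≤ a - 1), show a - j - 1 = a - 1 - j by omega]
      rw [h0, zero_add, List.map_congr_left hmapeq, catI_conv a ha1]
    rw [hstep]
    have hres := ih (a + 1) (l.set a (catI a)) (by omega) (by omega) (by simpa using hlen) ?_
    · refine ⟨hres.1, fun k => ?_⟩
      rw [hres.2 k, show a + 1 - 1 + cnt = a - 1 + (cnt + 1) by omega]
    · intro k
      by_cases hk : k = a
      · subst hk
        rw [getD_set_self' l k _ haln, if_pos (by omega)]
      · rw [getD_set_ne' l a k _ (Ne.symm hk), hinv k]
        by_cases hk2 : k ≤ a - 1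
        · rw [if_pos hk2, if_pos (by omega)]
        · rw [if_neg hk2, if_neg (by omega)]

lemma aCatalan_spec (n : Nat) (hn : 1 ≤ n) (k : Nat) :
    (aCatalan n).getD k 0 = if k ≤ n then catI k else 0 := by
  have hinit : ∀ k, (((List.replicate (n + 1) (0 : Int)).set 0 1).set 1 1).getD k 0
      = if k ≤ 2 - 1 then catI k else 0 := by
    intro k
    match k with
    | 0 =>
      rw [getD_set_ne' _ 1 0 _ (by omega), getD_set_self' _ 0 _ (by simp)]
      simp [catI, catalan_zero]
    | 1 =>
      rw [getD_set_self' _ 1 _ (by simp; omega)]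
      simp [catI, catalan_one]
    | (k + 2) =>
      rw [getD_set_ne' _ 1 _ _ (by omega), getD_set_ne' _ 0 _ _ (by omega)]
      rw [if_neg (by omega)]
      simp only [List.getD_eq_getElem?_getD, List.getElem?_replicate]
      split <;> rfl
  have h := aCatalan_aux n (n - 1) 2 _ (le_refl 2) (by omega) (by simp) hinit
  unfold aCatalan
  rw [h.2 k, show 2 - 1 + (n - 1) = n by omega]

-- B's cats list
lemma bCats_aux :
    ∀ (cnt a : Nat), 1 ≤ a →
      (List.range' a cnt).foldl
        (fun (st : List Int × Int) (k : Nat) =>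
          (st.1 ++ [PySem.Int.floordiv (st.2 * (4 * (k : Int) - 2)) ((k : Int) + 1)],
           PySem.Int.floordiv (st.2 * (4 * (k : Int) - 2)) ((k : Int) + 1)))
        ((List.range a).map catI, catI (a - 1))
      = ((List.range (a + cnt)).map catI, catI (a + cnt - 1)) := by
  intro cnt
  induction cnt with
  | zero => intro a _; rfl
  | succ cnt ih =>
    intro a ha
    rw [List.range'_succ, List.foldl_cons]
    have hdiv : PySem.Int.floordiv (catI (a - 1) * (4 * (a : Int) - 2)) ((a : Int) + 1) = catI a := by
      have hcast : catI (a - 1) * (4 * (a : Int) - 2) = ((catalan (a - 1) * (4 * a - 2) : Nat) : Int) := by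
        unfold catI
        push_cast [Nat.cast_sub (by omega : 2 ≤ 4 * a)]
        ring
      have hcast2 : ((a : Int) + 1) = (((a + 1 : Nat)) : Int) := by push_cast; ring
      rw [hcast, hcast2, PySem.Int.floordiv_natCast]
      have hrec : catalan (a - 1) * (4 * a - 2) = (a + 1) * catalan a := by
        have h := cat_rec (a - 1)
        rw [show a - 1 + 2 = a + 1 by omega, show a - 1 + 1 = a by omega,
            show 4 * (a - 1) + 2 = 4 * a - 2 by omega] at h
        rw [Nat.mul_comm]; exact h.symm
      rw [hrec, Nat.mul_div_cancel_left _ (by omega : 0 < a + 1)]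
      rfl
    rw [hdiv]
    have hlist : (List.range a).map catI ++ [catI a] = (List.range (a + 1)).map catI := by
      rw [List.range_succ, List.map_append]; rfl
    rw [hlist, show catI a = catI (a + 1 - 1) by rw [Nat.add_sub_cancel]]
    rw [ih (a + 1) (by omega), show a + 1 + cnt = a + (cnt + 1) from by omega]

lemma bCats_spec (n : Nat) (hn : 1 ≤ n) : bCats n = (List.range n).map catI := by
  unfold bCats
  have hinit : (([1], (1 : Int)) : List Int × Int) = ((List.range 1).map catI, catI (1 - 1)) := by
    simp [catI, catalan_zero]
  rw [hinit, bCats_aux (n - 1) 1 (le_refl 1), show 1 + (n - 1) = n by omega]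

-- a loop 'for r, v in enumerate(s)' is the loop 'for i in range(len(s))' over (i, s[i])
lemma foldl_enumerate (s : List Int) (g : List Int → (Int × Int) → List Int) (acc : List Int) :
    (PySem.List.enumerate s).foldl g acc
      = (List.range s.length).foldl (fun a (i : Nat) => g a ((i : Int), s.getD i 0)) acc := by
  rw [PySem.List.enumerate_eq_map_pyRange s 0,
      show PySem.List.len s = ((s.length : Nat) : Int) from rfl,
      PySem.List.pyRange_zero_natCast, List.foldl_map, List.foldl_map]
  exact PySem.List.foldl_congr_mem _ _ _ _ (fun acc i _ => by rw [PySem.List.pyGetD_natCast])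

lemma getD_map_range_catI (n i : Nat) (hi : i < n) : ((List.range n).map catI).getD i 0 = catI i := by
  rw [getD_eq_getElem' _ i (by simp [hi])]
  simp

-- ===== VERDICT (by name: the statement is the Claim_ definition above) =====
theorem countBSTs_spec : Claim_equal_countBSTs := by
  intro arr _ hpre
  unfold Spec_countBSTs countBSTs countBSTs_alt
  have hn1 : 1 ≤ arr.length := List.length_pos_iff.mpr hpre
  rw [foldl_enumerate, PySem.List.length_sorted]
  refine PySem.List.foldl_congr_mem _ _ _ _ (fun acc i hi => ?_)
  have hin : i < arr.length := List.mem_range.mp hi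
  rw [Int.toNat_natCast, bCats_spec _ hn1,
      getD_map_range_catI _ i hin, getD_map_range_catI _ (arr.length - 1 - i) (by omega),
      aCatalan_spec _ hn1 i, aCatalan_spec _ hn1 (arr.length - i - 1),
      if_pos (by omega), if_pos (by omega), show arr.length - i - 1 = arr.length - 1 - i by omega]
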